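-- pv_equiv track=rewrite | github.com/cobyhausrath/esc-pos-preview-tools | python/diagnose_bytes.py | visualize_byte_reversed
-- ===== SOURCE A (Python) =====
-- def visualize_byte_reversed(byte_val):
--     """Byte visualization with reversed bit order"""
--     bits = []
--     for bit in range(7, -1, -1):
--         if byte_val & (1 << bit):
--             bits.append('█')
--         else:
--             bits.append('░')
--     return bits
-- ===== SOURCE B (Python) =====
-- _TRANS = str.maketrans('10', '█░')
--
--
-- def visualize_byte_reversed(byte_val):
--     """Byte visualization with reversed bit order"""
--     return list(format(byte_val & 0xFF, '08b').translate(_TRANS))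
-- ===== Notes on version B (the rewrite author's own statement) =====
-- stated objective: idiomatic
-- what changed: B masks once to the low byte, builds the whole MSB-first binary string with Python's format(), and maps each digit character to a block character in one translation pass, instead of A's loop that masks and tests each bit individually and appends per-bit.
import Mathlib
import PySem

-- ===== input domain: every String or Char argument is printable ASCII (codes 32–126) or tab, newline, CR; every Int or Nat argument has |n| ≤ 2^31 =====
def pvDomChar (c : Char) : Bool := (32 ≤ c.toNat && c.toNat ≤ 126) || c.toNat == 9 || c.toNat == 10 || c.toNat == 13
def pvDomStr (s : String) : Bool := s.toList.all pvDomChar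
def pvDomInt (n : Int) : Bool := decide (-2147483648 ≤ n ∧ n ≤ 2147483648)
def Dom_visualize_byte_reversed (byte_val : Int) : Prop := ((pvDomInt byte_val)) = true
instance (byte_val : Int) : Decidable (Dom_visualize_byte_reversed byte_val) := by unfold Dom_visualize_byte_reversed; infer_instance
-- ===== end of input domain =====

-- B replaces A's per-bit mask-and-append loop with one mask to the low byte, one binary-string
-- formatting step, and one digit-to-block translation pass (idiomatic; same cost).
-- ===== PORT A =====
-- A masks each bit 7..0 of byte_val individually and appends a block char per bit.
def visualize_byte_reversed (byte_val : Int) : List String :=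
  (PySem.List.pyRange 7 (-1) (-1)).foldl
    (fun bits bit =>
      bits ++ [if PySem.Int.band byte_val ((1 : Int) <<< bit.toNat) ≠ 0 then "█" else "░"])
    []

-- ===== PORT B =====
-- port of Python's format(m, '08b') for 0 <= m < 256: the 8 binary digit chars, MSB first
def pvFormat08b (m : Int) : List Char :=
  (List.range 8).map (fun i => if m.toNat.testBit (7 - i) then '1' else '0')

-- B masks once with & 0xFF, formats as an 8-char binary string, then translates '1'/'0' to blocks.
def visualize_byte_reversed_alt (byte_val : Int) : List String :=
  (pvFormat08b (PySem.Int.band byte_val 255)).map (fun c => if c = '1' then "█" else "░")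

-- ===== PRECONDITION & SPEC =====
def Spec_visualize_byte_reversed (byte_val : Int) (out : List String) : Prop := out = visualize_byte_reversed_alt byte_val
instance (byte_val : Int) (out : List String) : Decidable (Spec_visualize_byte_reversed byte_val out) := by unfold Spec_visualize_byte_reversed; infer_instance

-- ===== CLAIM (what is proved, stated in full; the proofs are below) =====
def Claim_equal_visualize_byte_reversed : Prop := ∀ (byte_val : Int), Dom_visualize_byte_reversed byte_val → Spec_visualize_byte_reversed byte_val (visualize_byte_reversed byte_val)

-- ===== LEMMAS AND PROOFS =====
-- (255 - r) complements the low 8 bits of r, for r < 256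
set_option maxRecDepth 8192 in
theorem pv_sub_testBit : ∀ r < 256, ∀ k < 8, (255 - r).testBit k = ! r.testBit k := by decide

theorem pv_255_testBit : ∀ k < 8, Nat.testBit 255 k = true := by decide

-- A's per-bit truthiness test equals the k-th bit of the masked byte B formats
theorem pv_key (a : Int) (k : Nat) (hk : k < 8) :
    (PySem.Int.band a ((1 : Int) <<< (k : Int)) ≠ 0) ↔ (PySem.Int.band a 255).toNat.testBit k = true := by
  have hsh : (1 : Int) <<< (k : Int) = ((2 ^ k : Nat) : Int) := by
    rw [Int.one_shiftLeft]
  rcases le_or_gt 0 a with ha | ha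
  · rw [hsh, PySem.Int.band_of_nonneg ha (by positivity), PySem.Int.band_of_nonneg ha (by norm_num)]
    simp only [Int.toNat_natCast]
    by_cases hb : a.toNat.testBit k
    · simp [Nat.and_two_pow, hb, pv_255_testBit k hk]
    · simp [Nat.and_two_pow, hb]
  · have hm : ¬ 0 ≤ a := not_le.mpr ha
    rw [hsh]
    simp only [PySem.Int.band, if_neg hm,
      if_pos (by positivity : (0:Int) ≤ ((2 ^ k : Nat) : Int)),
      if_pos (by norm_num : (0:Int) ≤ (255:Int))]
    set m := (-a - 1).toNat with hm2
    have h255 : Int.toNat 255 = 255 := rfl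
    have h2 : (((2 ^ k : Nat) : Int)).toNat = 2 ^ k := Int.toNat_natCast _
    rw [h255, h2, Nat.two_pow_and]
    have hle : 255 &&& m ≤ 255 := Nat.and_le_left
    have htb : (255 - (255 &&& m)).testBit k = ! (255 &&& m).testBit k :=
      pv_sub_testBit _ (by omega) k hk
    by_cases hb : m.testBit k
    · simp [hb, htb, pv_255_testBit k hk]
    · simp [hb, htb]

-- one output cell: A's if on the mask test equals B's translated digit
theorem pv_cond (a : Int) (k : Nat) (hk : k < 8) :
    (if PySem.Int.band a ((1 : Int) <<< (k : Int)) ≠ 0 then "█" else "░") =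
    (if (if (PySem.Int.band a 255).toNat.testBit k = true then '1' else '0') = '1' then "█" else "░") := by
  by_cases hb : (PySem.Int.band a 255).toNat.testBit k = true
  · rw [if_pos ((pv_key a k hk).mpr hb)]; simp [hb]
  · rw [if_neg (fun h => hb ((pv_key a k hk).mp h))]; simp [hb]

-- ===== VERDICT (by name: the statement is the Claim_ definition above) =====
theorem visualize_byte_reversed_spec : Claim_equal_visualize_byte_reversed := by
  intro a _
  unfold Spec_visualize_byte_reversed
  have hr : PySem.List.pyRange 7 (-1) (-1) = [7, 6, 5, 4, 3, 2, 1, 0] := by decide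
  simp only [visualize_byte_reversed, visualize_byte_reversed_alt, pvFormat08b, hr,
    List.foldl_cons, List.foldl_nil, List.nil_append, List.cons_append,
    List.range_succ, List.range_zero, List.map_cons, List.map_nil,
    Nat.reduceSub]
  have e7 : Int.toNat 7 = 7 := rfl
  have e6 : Int.toNat 6 = 6 := rfl
  have e5 : Int.toNat 5 = 5 := rfl
  have e4 : Int.toNat 4 = 4 := rfl
  have e3 : Int.toNat 3 = 3 := rfl
  have e2 : Int.toNat 2 = 2 := rfl
  have e1 : Int.toNat 1 = 1 := rfl
  have e0 : Int.toNat 0 = 0 := rfl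
  simp only [e7, e6, e5, e4, e3, e2, e1, e0]
  rw [pv_cond a 7 (by omega), pv_cond a 6 (by omega), pv_cond a 5 (by omega),
    pv_cond a 4 (by omega), pv_cond a 3 (by omega), pv_cond a 2 (by omega),
    pv_cond a 1 (by omega), pv_cond a 0 (by omega)]
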